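-- pv_equiv track=rewrite | github.com/ProtocolCHecker/astrology-api | astrology_tool.py | _interpret_home_transits
-- ===== SOURCE A (Python) =====
-- def _interpret_home_transits(all_aspects):
--     """Interpret transits related to home and family"""
--     # Home related planets
--     home_planets = ["Moon", "Venus", "Saturn"]
--     home_aspects = []
--
--     # Filter relevant aspects
--     for aspect in all_aspects:
--         if aspect["transit_planet"] in home_planets:
--             home_aspects.append(aspect)
--
--     if not home_aspects:
--         return "Home and family matters continue along their current course."
--
--     # Count aspect types
--     challenging = len([a for a in home_aspects if a["aspect"] in ["Square", "Opposition"]])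
--     flowing = len([a for a in home_aspects if a["aspect"] in ["Trine", "Sextile"]])
--
--     # Generate interpretation
--     if challenging > flowing:
--         interpretation = "Home or family situations may require extra attention and patience this week."
--     elif flowing > challenging:
--         interpretation = "Domestic harmony flows more easily. A good time for home improvements or family gatherings."
--     else:
--         interpretation = "Balance between comfort and responsibility characterizes your home environment."
--
--     # Add specific insights
--     moon_aspects = [a for a in home_aspects if a["transit_planet"] == "Moon"]
--     if moon_aspects:
--         interpretation += " Emotional needs connected to security and belonging are highlighted."
--
--     return interpretation
-- ===== SOURCE B (Python) =====
-- def _interpret_home_transits(all_aspects):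
--     """Interpret transits related to home and family (single pass with counters)."""
--     challenging = 0
--     flowing = 0
--     moon_seen = False
--     any_home = False
--     for aspect in all_aspects:
--         tp = aspect["transit_planet"]
--         if tp == "Moon" or tp == "Venus" or tp == "Saturn":
--             any_home = True
--             asq = aspect["aspect"]
--             if asq == "Square" or asq == "Opposition":
--                 challenging += 1
--             elif asq == "Trine" or asq == "Sextile":
--                 flowing += 1
--             if tp == "Moon":
--                 moon_seen = True
--     if not any_home:
--         return "Home and family matters continue along their current course."
--     if challenging > flowing:
--         interpretation = "Home or family situations may require extra attention and patience this week."
--     elif flowing > challenging: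
--         interpretation = "Domestic harmony flows more easily. A good time for home improvements or family gatherings."
--     else:
--         interpretation = "Balance between comfort and responsibility characterizes your home environment."
--     return interpretation + (" Emotional needs connected to security and belonging are highlighted." if moon_seen else "")
-- ===== Notes on version B (the rewrite author's own statement) =====
-- stated objective: simpler
-- what changed: B makes one pass over all_aspects maintaining integer counters, a moon flag and an any-home flag, instead of A's filter pass plus three re-scans of the filtered list.
import Mathlib
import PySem

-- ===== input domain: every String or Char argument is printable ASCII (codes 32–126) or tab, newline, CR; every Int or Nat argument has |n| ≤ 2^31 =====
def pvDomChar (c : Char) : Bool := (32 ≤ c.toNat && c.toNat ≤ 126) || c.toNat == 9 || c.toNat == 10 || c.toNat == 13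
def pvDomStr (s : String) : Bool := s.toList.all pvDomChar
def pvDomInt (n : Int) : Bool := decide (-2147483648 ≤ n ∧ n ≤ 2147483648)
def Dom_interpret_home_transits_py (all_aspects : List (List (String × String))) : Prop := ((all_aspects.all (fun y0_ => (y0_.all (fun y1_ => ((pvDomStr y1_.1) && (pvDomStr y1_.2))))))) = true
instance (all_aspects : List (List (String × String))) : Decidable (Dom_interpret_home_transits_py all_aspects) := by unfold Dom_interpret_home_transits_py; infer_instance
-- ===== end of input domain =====

-- B is a single pass over all_aspects with counters and flags, instead of A's filter pass plus three re-scans.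

-- shared helper: aspect["k"] with default "" — exact under Pre_ (the key is present there; first match = Python dict lookup under the assoc-list convention)
def pvGetD (a : List (String × String)) (k : String) : String :=
  (List.lookup k a).getD ""

-- ===== PORT A =====
def interpret_home_transits_py (all_aspects : List (List (String × String))) : String :=
  let home_planets := ["Moon", "Venus", "Saturn"]
  let home_aspects := all_aspects.foldl (fun acc aspect =>
    if home_planets.contains (pvGetD aspect "transit_planet") then acc ++ [aspect] else acc) []
  if home_aspects = [] then
    "Home and family matters continue along their current course."
  else
    let challenging := (home_aspects.filter (fun a => (["Square", "Opposition"] : List String).contains (pvGetD a "aspect"))).length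
    let flowing := (home_aspects.filter (fun a => (["Trine", "Sextile"] : List String).contains (pvGetD a "aspect"))).length
    let interpretation :=
      if challenging > flowing then
        "Home or family situations may require extra attention and patience this week."
      else if flowing > challenging then
        "Domestic harmony flows more easily. A good time for home improvements or family gatherings."
      else
        "Balance between comfort and responsibility characterizes your home environment."
    let moon_aspects := home_aspects.filter (fun a => pvGetD a "transit_planet" == "Moon")
    if moon_aspects ≠ [] then
      interpretation ++ " Emotional needs connected to security and belonging are highlighted."
    else
      interpretation

-- ===== PORT B =====
def interpret_home_transits_py_alt (all_aspects : List (List (String × String))) : String :=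
  let st := all_aspects.foldl (fun (st : Int × Int × Bool × Bool) aspect =>
    let tp := pvGetD aspect "transit_planet"
    if tp = "Moon" ∨ tp = "Venus" ∨ tp = "Saturn" then
      let moon := st.2.2.1 || (tp == "Moon")
      let asq := pvGetD aspect "aspect"
      if asq = "Square" ∨ asq = "Opposition" then
        (st.1 + 1, st.2.1, moon, true)
      else if asq = "Trine" ∨ asq = "Sextile" then
        (st.1, st.2.1 + 1, moon, true)
      else
        (st.1, st.2.1, moon, true)
    else st) (0, 0, false, false)
  if !st.2.2.2 then
    "Home and family matters continue along their current course."
  else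
    (if st.1 > st.2.1 then
      "Home or family situations may require extra attention and patience this week."
    else if st.2.1 > st.1 then
      "Domestic harmony flows more easily. A good time for home improvements or family gatherings."
    else
      "Balance between comfort and responsibility characterizes your home environment.")
    ++ (if st.2.2.1 then " Emotional needs connected to security and belonging are highlighted." else "")

-- ===== PRECONDITION & SPEC =====
-- Pre_ excludes exactly the inputs where Python A raises KeyError: an aspect dict missing "transit_planet",
-- or a home aspect (transit_planet Moon/Venus/Saturn) missing "aspect". B raises there too.
def Pre_interpret_home_transits_py (all_aspects : List (List (String × String))) : Prop :=
  ∀ a ∈ all_aspects, (List.lookup "transit_planet" a).isSome ∧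
    (List.lookup "transit_planet" a = some "Moon" ∨ List.lookup "transit_planet" a = some "Venus" ∨
     List.lookup "transit_planet" a = some "Saturn" → (List.lookup "aspect" a).isSome)
instance (all_aspects : List (List (String × String))) : Decidable (Pre_interpret_home_transits_py all_aspects) := by
  unfold Pre_interpret_home_transits_py; infer_instance

def pvWitness_interpret_home_transits_py : (List (List (String × String))) :=
  [[("transit_planet", "Moon"), ("aspect", "Square")], [("transit_planet", "Sun"), ("aspect", "Trine")]]

def Spec_interpret_home_transits_py (all_aspects : List (List (String × String))) (out : String) : Prop := out = interpret_home_transits_py_alt all_aspects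
instance (all_aspects : List (List (String × String))) (out : String) : Decidable (Spec_interpret_home_transits_py all_aspects out) := by unfold Spec_interpret_home_transits_py; infer_instance

-- ===== CLAIM (what is proved, stated in full; the proofs are below) =====
def Claim_equal_interpret_home_transits_py : Prop := ∀ (all_aspects : List (List (String × String))), Dom_interpret_home_transits_py all_aspects → Pre_interpret_home_transits_py all_aspects → Spec_interpret_home_transits_py all_aspects (interpret_home_transits_py all_aspects)

-- ===== LEMMAS AND PROOFS =====

def pvHome (a : List (String × String)) : Bool :=
  (["Moon", "Venus", "Saturn"] : List String).contains (pvGetD a "transit_planet")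
def pvCh (a : List (String × String)) : Bool :=
  (["Square", "Opposition"] : List String).contains (pvGetD a "aspect")
def pvFl (a : List (String × String)) : Bool :=
  (["Trine", "Sextile"] : List String).contains (pvGetD a "aspect")
def pvMoon (a : List (String × String)) : Bool :=
  pvGetD a "transit_planet" == "Moon"


lemma pvHome_iff (a : List (String × String)) : pvHome a = true ↔
    (pvGetD a "transit_planet" = "Moon" ∨ pvGetD a "transit_planet" = "Venus" ∨ pvGetD a "transit_planet" = "Saturn") := by
  simp [pvHome]

lemma pvCh_iff (a : List (String × String)) : pvCh a = true ↔
    (pvGetD a "aspect" = "Square" ∨ pvGetD a "aspect" = "Opposition") := by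
  simp [pvCh]

lemma pvFl_iff (a : List (String × String)) : pvFl a = true ↔
    (pvGetD a "aspect" = "Trine" ∨ pvGetD a "aspect" = "Sextile") := by
  simp [pvFl]

-- B's fold, characterized over the filtered home list
lemma b_fold_char (l : List (List (String × String))) (c f : Int) (m h : Bool) :
    l.foldl (fun (st : Int × Int × Bool × Bool) aspect =>
      let tp := pvGetD aspect "transit_planet"
      if tp = "Moon" ∨ tp = "Venus" ∨ tp = "Saturn" then
        let moon := st.2.2.1 || (tp == "Moon")
        let asq := pvGetD aspect "aspect"
        if asq = "Square" ∨ asq = "Opposition" then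
          (st.1 + 1, st.2.1, moon, true)
        else if asq = "Trine" ∨ asq = "Sextile" then
          (st.1, st.2.1 + 1, moon, true)
        else
          (st.1, st.2.1, moon, true)
      else st) (c, f, m, h)
    = (c + ((l.filter pvHome).countP pvCh : Int),
       f + ((l.filter pvHome).countP pvFl : Int),
       m || (l.filter pvHome).any pvMoon,
       h || !(l.filter pvHome).isEmpty) := by
  induction l generalizing c f m h with
  | nil => simp
  | cons x l ih =>
    rw [List.foldl_cons]
    by_cases hH : pvGetD x "transit_planet" = "Moon" ∨ pvGetD x "transit_planet" = "Venus" ∨ pvGetD x "transit_planet" = "Saturn"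
    · have hHb : pvHome x = true := (pvHome_iff x).mpr hH
      by_cases hc : pvGetD x "aspect" = "Square" ∨ pvGetD x "aspect" = "Opposition"
      · have hcb : pvCh x = true := (pvCh_iff x).mpr hc
        have hfb : pvFl x = false := by
          rcases hc with h | h <;> simp [pvFl, h]
        simp only [if_pos hH, if_pos hc, ih, List.filter_cons, hHb, if_true, List.countP_cons,
          List.any_cons, List.isEmpty_cons, hcb, hfb, pvMoon, Prod.mk.injEq]
        refine ⟨by push_cast; ring, by push_cast; ring, ?_, by simp⟩
        simp [Bool.or_assoc]
      · have hcb : pvCh x = false := by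
          cases hb : pvCh x
          · rfl
          · exact absurd ((pvCh_iff x).mp hb) hc
        by_cases hf : pvGetD x "aspect" = "Trine" ∨ pvGetD x "aspect" = "Sextile"
        · have hfb : pvFl x = true := (pvFl_iff x).mpr hf
          simp only [if_pos hH, if_neg hc, if_pos hf, ih, List.filter_cons, hHb, if_true,
            List.countP_cons, List.any_cons, List.isEmpty_cons, hcb, hfb, pvMoon, Prod.mk.injEq]
          refine ⟨by push_cast; ring, by push_cast; ring, ?_, by simp⟩
          simp [Bool.or_assoc]
        · have hfb : pvFl x = false := by
            cases hb : pvFl x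
            · rfl
            · exact absurd ((pvFl_iff x).mp hb) hf
          simp only [if_pos hH, if_neg hc, if_neg hf, ih, List.filter_cons, hHb, if_true,
            List.countP_cons, List.any_cons, List.isEmpty_cons, hcb, hfb, pvMoon, Prod.mk.injEq]
          refine ⟨by push_cast; ring, by push_cast; ring, ?_, by simp⟩
          simp [Bool.or_assoc]
    · have hHb : pvHome x = false := by
        cases hb : pvHome x
        · rfl
        · exact absurd ((pvHome_iff x).mp hb) hH
      simp only [if_neg hH, ih, List.filter_cons, hHb]
      simp

-- the common normal form of both ports
def pvFinish (c f : Int) (moon hasHome : Bool) : String :=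
  if !hasHome then
    "Home and family matters continue along their current course."
  else
    (if c > f then
      "Home or family situations may require extra attention and patience this week."
    else if f > c then
      "Domestic harmony flows more easily. A good time for home improvements or family gatherings."
    else
      "Balance between comfort and responsibility characterizes your home environment.")
    ++ (if moon then " Emotional needs connected to security and belonging are highlighted." else "")

lemma tail_moon (hl : List (List (String × String))) (s : String) :
    (if hl.filter pvMoon ≠ [] then s ++ " Emotional needs connected to security and belonging are highlighted." else s)
    = s ++ (if hl.any pvMoon then " Emotional needs connected to security and belonging are highlighted." else "") := by
  have hm : (hl.filter pvMoon ≠ []) ↔ (hl.any pvMoon = true) := by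
    rw [ne_eq, List.filter_eq_nil_iff, List.any_eq_true]
    push Not
    simp
  by_cases hmoon : hl.any pvMoon
  · rw [if_pos (hm.mpr hmoon), hmoon, if_pos rfl]
  · rw [Bool.not_eq_true] at hmoon
    rw [if_neg (fun hc => by rw [hm, hmoon] at hc; exact Bool.false_ne_true hc), hmoon]
    simp

lemma A_tail_norm (hl : List (List (String × String))) :
    (if hl = [] then
      "Home and family matters continue along their current course."
    else
      let challenging := (hl.filter pvCh).length
      let flowing := (hl.filter pvFl).length
      let interpretation :=
        if challenging > flowing then
          "Home or family situations may require extra attention and patience this week."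
        else if flowing > challenging then
          "Domestic harmony flows more easily. A good time for home improvements or family gatherings."
        else
          "Balance between comfort and responsibility characterizes your home environment."
      let moon_aspects := hl.filter pvMoon
      if moon_aspects ≠ [] then
        interpretation ++ " Emotional needs connected to security and belonging are highlighted."
      else
        interpretation)
    = pvFinish ((hl.countP pvCh : Int)) ((hl.countP pvFl : Int)) (hl.any pvMoon) (!hl.isEmpty) := by
  by_cases he : hl = []
  · subst he; simp [pvFinish]
  · rw [if_neg he]
    have hH : (!hl.isEmpty) = true := by simp [he]
    simp only [pvFinish, hH, Bool.not_true, Bool.false_eq_true, if_false]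
    simp only [← List.countP_eq_length_filter]
    by_cases h1 : hl.countP pvCh > hl.countP pvFl
    · rw [if_pos h1,
        if_pos (show ((hl.countP pvCh : Int)) > ((hl.countP pvFl : Int)) from Int.ofNat_lt.mpr h1)]
      exact tail_moon hl _
    · rw [if_neg h1,
        if_neg (show ¬(((hl.countP pvCh : Int)) > ((hl.countP pvFl : Int))) from fun hc => h1 (Int.ofNat_lt.mp hc))]
      by_cases h2 : hl.countP pvFl > hl.countP pvCh
      · rw [if_pos h2,
          if_pos (show ((hl.countP pvFl : Int)) > ((hl.countP pvCh : Int)) from Int.ofNat_lt.mpr h2)]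
        exact tail_moon hl _
      · rw [if_neg h2,
          if_neg (show ¬(((hl.countP pvFl : Int)) > ((hl.countP pvCh : Int))) from fun hc => h2 (Int.ofNat_lt.mp hc))]
        exact tail_moon hl _

lemma A_norm (all : List (List (String × String))) :
    interpret_home_transits_py all
    = pvFinish (((all.filter pvHome).countP pvCh : Int)) (((all.filter pvHome).countP pvFl : Int))
        ((all.filter pvHome).any pvMoon) (!(all.filter pvHome).isEmpty) := by
  simp only [interpret_home_transits_py]
  rw [show (all.foldl (fun acc aspect =>
      if (["Moon", "Venus", "Saturn"] : List String).contains (pvGetD aspect "transit_planet")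
      then acc ++ [aspect] else acc) []) = [] ++ all.filter pvHome from
    PySem.List.foldl_append_if_eq_filter _ _ _]
  rw [List.nil_append]
  exact A_tail_norm (all.filter pvHome)

lemma B_norm (all : List (List (String × String))) :
    interpret_home_transits_py_alt all
    = pvFinish (((all.filter pvHome).countP pvCh : Int)) (((all.filter pvHome).countP pvFl : Int))
        ((all.filter pvHome).any pvMoon) (!(all.filter pvHome).isEmpty) := by
  simp only [interpret_home_transits_py_alt]
  rw [b_fold_char]
  simp [pvFinish]

theorem interpret_home_transits_py_spec : Claim_equal_interpret_home_transits_py := by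
  intro all _ _
  show interpret_home_transits_py all = interpret_home_transits_py_alt all
  rw [A_norm, B_norm]
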